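-- pv_equiv track=rewrite | github.com/awillis-dev/formation | formation/pair-learning-sessions/skill-level.py | canMatchFellows
-- ===== SOURCE A (Python) =====
-- def canMatchFellows(input):
--     skillSet = set()
--
--     for skillLevel in input:
--         skill = input[skillLevel]
--         if skill in skillSet:
--             skillSet.remove(skill)
--         else:
--             skillSet.add(skill)
--
--
--     return len(skillSet) == 0
-- ===== SOURCE B (Python) =====
-- def canMatchFellows(input):
--     vals = sorted(input[k] for k in input)
--     i = 0
--     while i + 1 < len(vals):
--         if vals[i] != vals[i + 1]:
--             return False
--         i += 2
--     return i == len(vals)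
-- ===== Notes on version B (the rewrite author's own statement) =====
-- stated objective: alternative
-- what changed: B sorts the skill values (same key-indexed extraction as A) and then checks that the sorted list splits into adjacent equal pairs, instead of A's single-pass presence toggling in a set.
import Mathlib
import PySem

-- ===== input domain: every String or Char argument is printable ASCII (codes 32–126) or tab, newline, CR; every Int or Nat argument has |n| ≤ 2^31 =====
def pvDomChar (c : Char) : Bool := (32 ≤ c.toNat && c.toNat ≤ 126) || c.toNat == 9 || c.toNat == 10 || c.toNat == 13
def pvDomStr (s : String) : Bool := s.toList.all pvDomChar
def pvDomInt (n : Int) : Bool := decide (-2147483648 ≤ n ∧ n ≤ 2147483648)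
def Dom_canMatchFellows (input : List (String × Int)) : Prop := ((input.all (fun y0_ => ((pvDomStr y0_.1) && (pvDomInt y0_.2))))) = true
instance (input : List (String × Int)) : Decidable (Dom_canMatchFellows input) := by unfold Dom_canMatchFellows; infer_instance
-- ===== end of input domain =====

-- B sorts the skill values (same key-indexed extraction as A) and checks that the sorted
-- list splits into adjacent equal pairs, instead of A's presence toggling in a set
-- (objective: alternative algorithm, same result).

-- ===== PORT A =====
-- for skillLevel in input: toggle input[skillLevel] in skillSet; return len(skillSet) == 0.
-- skillSet.remove under the 'skill in skillSet' guard never raises, so Set.discard is exact;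
-- input[skillLevel] is always present for an iterated key, so getD with any default is exact.
def canMatchFellows (input : List (String × Int)) : Bool :=
  let d : PySem.Dict String Int := PySem.Dict.mk input
  let skillSet : PySem.Set Int :=
    d.keys.foldl (fun skillSet skillLevel =>
      let skill := d.getD skillLevel 0
      if PySem.Set.contains skillSet skill then PySem.Set.discard skillSet skill
      else PySem.Set.add skillSet skill) PySem.Set.empty
  PySem.Set.len skillSet == 0

-- ===== PORT B =====
-- the while loop 'i = 0; while i+1 < len(vals): if vals[i] != vals[i+1]: return False;
-- i += 2; return i == len(vals)' consumes the sorted list two elements at a time and is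
-- transcribed as this structural two-step recursion (i reaches len exactly when no single
-- element is left over).
def pvPaired : List Int → Bool
  | [] => true
  | [_] => false
  | x :: y :: rest => x == y && pvPaired rest

-- vals = sorted(input[k] for k in input); then the pair scan
def canMatchFellows_alt (input : List (String × Int)) : Bool :=
  let d : PySem.Dict String Int := PySem.Dict.mk input
  let vals := PySem.List.sorted (d.keys.map (fun k => d.getD k 0)) (fun x => x) false
  pvPaired vals

-- ===== PRECONDITION & SPEC =====
-- no Pre_: A returns on every well-typed input, and the equivalence is total.
def Spec_canMatchFellows (input : List (String × Int)) (out : Bool) : Prop := out = canMatchFellows_alt input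
instance (input : List (String × Int)) (out : Bool) : Decidable (Spec_canMatchFellows input out) := by unfold Spec_canMatchFellows; infer_instance

-- ===== CLAIM (what is proved, stated in full; the proofs are below) =====
def Claim_equal_canMatchFellows : Prop := ∀ (input : List (String × Int)), Dom_canMatchFellows input → Spec_canMatchFellows input (canMatchFellows input)

-- ===== LEMMAS AND PROOFS =====

-- A's loop body as a named step function
def pvToggle (s : PySem.Set Int) (x : Int) : PySem.Set Int :=
  if PySem.Set.contains s x then PySem.Set.discard s x else PySem.Set.add s x

lemma pvToggle_mem (s : PySem.Set Int) (x v : Int) :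
    v ∈ pvToggle s x ↔ (if v = x then v ∉ s else v ∈ s) := by
  unfold pvToggle
  by_cases hx : x ∈ s
  · rw [if_pos ((PySem.Set.contains_iff s x).mpr hx), PySem.Set.mem_discard]
    by_cases hvx : v = x <;> simp [hvx, hx]
  · rw [if_neg (fun h => hx ((PySem.Set.contains_iff s x).mp h)), PySem.Set.mem_add]
    by_cases hvx : v = x <;> simp [hvx, hx]

-- invariant of A's loop: membership in the toggled set is the parity of the count seen so far
lemma pvFold_mem (vs : List Int) : ∀ (s : PySem.Set Int),
    ∀ v, v ∈ vs.foldl pvToggle s ↔ ((v ∈ s) ↔ vs.count v % 2 = 0) := by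
  induction vs with
  | nil => intro s v; simp
  | cons x vs ih =>
    intro s v
    rw [List.foldl_cons, ih (pvToggle s x) v, pvToggle_mem s x v]
    by_cases hvx : v = x
    · subst hvx
      rw [if_pos rfl, List.count_cons_self]
      have h2 : (vs.count v + 1) % 2 = 0 ↔ ¬ vs.count v % 2 = 0 := by omega
      rw [h2]; tauto
    · rw [if_neg hvx, List.count_cons_of_ne (fun h => hvx h.symm)]

-- A's result characterised: the toggled set is empty iff every value occurs an even number of times
lemma pvA_char (vs : List Int) :
    (PySem.Set.len (vs.foldl pvToggle PySem.Set.empty) == 0) = true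
      ↔ ∀ v, vs.count v % 2 = 0 := by
  have hres : ∀ v, v ∈ vs.foldl pvToggle PySem.Set.empty ↔ ¬ vs.count v % 2 = 0 := by
    intro v
    rw [pvFold_mem vs PySem.Set.empty v]
    have : v ∉ PySem.Set.empty (α := Int) := by simp [PySem.Set.empty]
    tauto
  constructor
  · intro h v
    have hlen : (vs.foldl pvToggle PySem.Set.empty).length = 0 := by
      have := beq_iff_eq.mp h
      simpa [PySem.Set.len] using this
    have hnil : vs.foldl pvToggle PySem.Set.empty = [] := List.length_eq_zero_iff.mp hlen
    by_contra hodd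
    have := (hres v).mpr hodd
    rw [hnil] at this
    exact absurd this (List.not_mem_nil)
  · intro h
    have hnil : vs.foldl pvToggle PySem.Set.empty = [] := by
      apply List.eq_nil_iff_forall_not_mem.mpr
      intro v hv
      exact (hres v).mp hv (h v)
    rw [hnil]; rfl

-- B's pair scan characterised, on a nondecreasing list: it succeeds iff every count is even
lemma pvPaired_char (vs : List Int) (hs : vs.Pairwise (· ≤ ·)) :
    pvPaired vs = true ↔ ∀ v, vs.count v % 2 = 0 := by
  induction vs using pvPaired.induct with
  | case1 => simp [pvPaired]
  | case2 x =>
    simp only [pvPaired]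
    constructor
    · intro h; exact absurd h (by simp)
    · intro h
      have := h x
      simp at this
  | case3 x y rest ih =>
    have hxy : x ≤ y := (List.pairwise_cons.mp hs).1 y (by simp)
    have hrest : rest.Pairwise (· ≤ ·) :=
      ((List.pairwise_cons.mp (List.pairwise_cons.mp hs).2).2)
    by_cases hexy : x = y
    · subst hexy
      simp only [pvPaired, BEq.rfl, Bool.true_and]
      rw [ih hrest]
      constructor
      · intro h v
        by_cases hvx : v = x
        · subst hvx
          rw [List.count_cons_self, List.count_cons_self]
          have := h v; omega
        · rw [List.count_cons_of_ne (fun h' => hvx h'.symm),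
              List.count_cons_of_ne (fun h' => hvx h'.symm)]
          exact h v
      · intro h v
        have := h v
        by_cases hvx : v = x
        · subst hvx
          rw [List.count_cons_self, List.count_cons_self] at this; omega
        · rw [List.count_cons_of_ne (fun h' => hvx h'.symm),
              List.count_cons_of_ne (fun h' => hvx h'.symm)] at this
          exact this
    · -- x < y and everything after is ≥ y, so x occurs exactly once: both sides false
      have hxlt : x < y := lt_of_le_of_ne hxy hexy
      have hnotx : x ∉ y :: rest := by
        intro hmem
        have hall : ∀ z ∈ y :: rest, y ≤ z := by
          intro z hz
          rcases List.mem_cons.mp hz with h | h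
          · exact h ▸ le_refl y
          · exact (List.pairwise_cons.mp (List.pairwise_cons.mp hs).2).1 z h
        exact absurd (hall x hmem) (not_le.mpr hxlt)
      constructor
      · intro h
        simp [pvPaired, hexy] at h
      · intro h
        have := h x
        rw [List.count_cons_self, List.count_eq_zero_of_not_mem hnotx] at this
        omega

theorem canMatchFellows_spec_aux (input : List (String × Int)) :
    canMatchFellows input = canMatchFellows_alt input := by
  unfold canMatchFellows canMatchFellows_alt
  simp only []
  set d := PySem.Dict.mk input with hd
  set vs := d.keys.map (fun k => d.getD k 0) with hvs
  -- A's key-loop is the toggle fold over vs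
  rw [show d.keys.foldl (fun s k =>
      if PySem.Set.contains s (d.getD k 0) then PySem.Set.discard s (d.getD k 0)
      else PySem.Set.add s (d.getD k 0)) PySem.Set.empty
    = vs.foldl pvToggle PySem.Set.empty by rw [hvs, List.foldl_map]; rfl]
  -- sorted vs is a nondecreasing permutation of vs, so counts agree
  have hperm : (PySem.List.sorted vs (fun x => x) false).Perm vs :=
    PySem.List.sorted_perm vs (fun x => x) false
  have hpw : (PySem.List.sorted vs (fun x => x) false).Pairwise (· ≤ ·) := by
    have := PySem.List.sorted_pairwise vs (fun x => x)
    simpa using this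
  have hA := pvA_char vs
  have hB := pvPaired_char (PySem.List.sorted vs (fun x => x) false) hpw
  have hcount : ∀ v, (PySem.List.sorted vs (fun x => x) false).count v = vs.count v :=
    fun v => hperm.count_eq v
  cases hb : pvPaired (PySem.List.sorted vs (fun x => x) false) with
  | true =>
    have := hB.mp hb
    exact hA.mpr (fun v => by rw [← hcount v]; exact this v)
  | false =>
    by_contra hne
    have ha : (PySem.Set.len (vs.foldl pvToggle PySem.Set.empty) == 0) = true := by
      cases h : (PySem.Set.len (vs.foldl pvToggle PySem.Set.empty) == 0)
      · rw [h] at hne; exact absurd rfl hne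
      · rfl
    have := hA.mp ha
    have : pvPaired (PySem.List.sorted vs (fun x => x) false) = true :=
      hB.mpr (fun v => by rw [hcount v]; exact this v)
    rw [hb] at this; exact Bool.false_ne_true this

-- ===== VERDICT (by name: the statement is the Claim_ definition above) =====
theorem canMatchFellows_spec : Claim_equal_canMatchFellows := by
  intro input _
  unfold Spec_canMatchFellows
  exact canMatchFellows_spec_aux input
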